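-- pv_equiv track=rewrite | github.com/opendaylight/netconf | test/tools/netconf_tools/configurer.py | sorted_repr
-- ===== SOURCE A (Python) =====
-- import collections
--
-- def sorted_repr(counter):
--     """
--     Return sorted and inverted representation of Counter,
--     intended to make large output more readable.
--     Also, the shorter report part collapses items differing only in response text.
--     """
--     short_counter = collections.Counter()
--     for key_tuple in counter:
--         short_counter[(key_tuple[0], key_tuple[1])] += counter[key_tuple]
--     short_list = sorted(short_counter.keys())
--     short_text = ", ".join(
--         [
--             "(" + item[0] + ":" + item[1] + ")x" + str(short_counter[item])
--             for item in short_list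
--         ]
--     )
--     long_text = "\n".join([item[2] for item in sorted(counter.keys(), reverse=True)])
--     return short_text + "\nresponses:\n" + long_text
-- ===== SOURCE B (Python) =====
-- def sorted_repr(counter):
--     """
--     Same report as the original, built from ONE ascending sort of the keys:
--     a single linear pass over the sorted keys merges runs sharing (key[0], key[1])
--     into the short counts, and the long part is the same sorted list walked backwards.
--     """
--     skeys = sorted(counter)
--     parts = []
--     for k in skeys:
--         v = counter[k]
--         if parts and parts[-1][0] == (k[0], k[1]):
--             parts[-1][1] += v
--         else:
--             parts.append([(k[0], k[1]), v])
--     short_text = ", ".join(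
--         "(" + p[0][0] + ":" + p[0][1] + ")x" + str(p[1]) for p in parts
--     )
--     long_text = "\n".join(k[2] for k in reversed(skeys))
--     return short_text + "\nresponses:\n" + long_text
-- ===== Notes on version B (the rewrite author's own statement) =====
-- stated objective: alternative
-- what changed: Replaces A's Counter-building increment loop plus two separate sorts (ascending pair sort and reverse triple sort) with a single ascending sort of the keys, one linear pass that merges adjacent runs sharing (key[0], key[1]) into the short counts, and a backwards walk of the same sorted list for the long part.
import Mathlib
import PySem

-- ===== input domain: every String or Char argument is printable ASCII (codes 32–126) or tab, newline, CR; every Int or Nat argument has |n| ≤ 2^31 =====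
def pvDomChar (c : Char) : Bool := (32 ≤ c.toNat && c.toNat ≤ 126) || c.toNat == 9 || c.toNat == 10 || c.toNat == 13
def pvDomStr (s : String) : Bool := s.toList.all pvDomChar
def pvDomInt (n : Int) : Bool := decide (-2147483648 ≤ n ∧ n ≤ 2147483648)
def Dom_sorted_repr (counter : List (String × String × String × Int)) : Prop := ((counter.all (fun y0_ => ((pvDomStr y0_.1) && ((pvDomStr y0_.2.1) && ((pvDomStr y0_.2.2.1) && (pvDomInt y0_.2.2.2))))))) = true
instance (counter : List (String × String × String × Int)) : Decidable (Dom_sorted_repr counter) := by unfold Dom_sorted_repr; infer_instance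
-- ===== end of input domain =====

-- ===== PORT A =====
-- B reuses A's output layout but builds it from ONE sort; objective: alternative decomposition (not timed faster).
-- Both ports first read the Python dict argument as a PySem.Dict (insertion order, unique keys), per the type convention.
-- Python's tuple comparison on string pairs/triples is the lexicographic order on Lex products
-- (exact: Python str < is Lean String <); pvKey3/pvKeyP are those sort keys, pvPair is (key[0], key[1]).
def pvPair (k : String × String × String) : String × String := (k.1, k.2.1)
def pvKey3 (k : String × String × String) : Lex (String × Lex (String × String)) :=
  toLex (k.1, toLex (k.2.1, k.2.2))
def pvKeyP (p : String × String) : Lex (String × String) := toLex p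

def sorted_repr (counter : List (String × String × String × Int)) : String :=
  let d : PySem.Dict (String × String × String) Int :=
    PySem.Dict.ofList (counter.map (fun p => ((p.1, p.2.1, p.2.2.1), p.2.2.2)))
  -- for key_tuple in counter: short_counter[(key_tuple[0], key_tuple[1])] += counter[key_tuple]
  let sc : PySem.Dict (String × String) Int :=
    d.keys.foldl (fun sc k => sc.modify (pvPair k) 0 (· + d.getD k 0)) PySem.Dict.empty
  let shortList := PySem.List.sorted sc.keys pvKeyP false
  let shortText := PySem.Str.join ", " (shortList.map (fun item =>
    "(" ++ item.1 ++ ":" ++ item.2 ++ ")x" ++ PySem.Int.toStr (sc.getD item 0)))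
  let longText := PySem.Str.join "\n" ((PySem.List.sorted d.keys pvKey3 true).map (fun item => item.2.2))
  shortText ++ "\nresponses:\n" ++ longText

-- ===== PORT B =====
def sorted_repr_alt (counter : List (String × String × String × Int)) : String :=
  let d : PySem.Dict (String × String × String) Int :=
    PySem.Dict.ofList (counter.map (fun p => ((p.1, p.2.1, p.2.2.1), p.2.2.2)))
  let skeys := PySem.List.sorted d.keys pvKey3 false
  -- the merging loop: parts is Python's list of [pair, total]; mutating parts[-1][1] becomes rebuilding the last cell
  let parts := skeys.foldl (fun parts k =>
    match parts.getLast? with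
    | some last =>
      if last.1 = pvPair k then parts.dropLast ++ [(last.1, last.2 + d.getD k 0)]
      else parts ++ [(pvPair k, d.getD k 0)]
    | none => [(pvPair k, d.getD k 0)]) ([] : List ((String × String) × Int))
  let shortText := PySem.Str.join ", " (parts.map (fun p =>
    "(" ++ p.1.1 ++ ":" ++ p.1.2 ++ ")x" ++ PySem.Int.toStr p.2))
  let longText := PySem.Str.join "\n" (skeys.reverse.map (fun k => k.2.2))
  shortText ++ "\nresponses:\n" ++ longText

-- ===== PRECONDITION & SPEC =====
def Spec_sorted_repr (counter : List (String × String × String × Int)) (out : String) : Prop := out = sorted_repr_alt counter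
instance (counter : List (String × String × String × Int)) (out : String) : Decidable (Spec_sorted_repr counter out) := by unfold Spec_sorted_repr; infer_instance

-- ===== CLAIM (what is proved, stated in full; the proofs are below) =====
def Claim_equal_sorted_repr : Prop := ∀ (counter : List (String × String × String × Int)), Dom_sorted_repr counter → Spec_sorted_repr counter (sorted_repr counter)

-- ===== LEMMAS AND PROOFS =====

def pvSum (val : (String × String × String) → Int) (l : List (String × String × String))
    (p : String × String) : Int :=
  ((l.filter (fun k => pvPair k = p)).map val).sum

def pvGrp (val : (String × String × String) → Int) :
    List (String × String × String) → List ((String × String) × Int)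
  | [] => []
  | k :: t =>
    (pvPair k, val k + ((t.takeWhile (fun x => pvPair x = pvPair k)).map val).sum) ::
      pvGrp val (t.dropWhile (fun x => pvPair x = pvPair k))
termination_by l => l.length
decreasing_by
  exact Nat.lt_succ_of_le (List.length_dropWhile_le _ _)

theorem pv_lex_pair_mono (a b : String × String × String) (h : pvKey3 a ≤ pvKey3 b) :
    pvKeyP (pvPair a) ≤ pvKeyP (pvPair b) := by
  unfold pvKey3 at h
  unfold pvKeyP pvPair
  rw [Prod.Lex.le_iff] at h ⊢
  simp only [ofLex_toLex] at h ⊢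
  rcases h with h | ⟨h1, h2⟩
  · exact Or.inl h
  · rw [Prod.Lex.le_iff] at h2
    simp only [ofLex_toLex] at h2
    rcases h2 with h2 | ⟨h2, _⟩
    · exact Or.inr ⟨h1, le_of_lt h2⟩
    · exact Or.inr ⟨h1, le_of_eq h2⟩

theorem pv_key3_inj : Function.Injective pvKey3 := by
  intro a b h
  unfold pvKey3 at h
  simp only [toLex_inj, Prod.mk.injEq] at h
  obtain ⟨h1, h2, h3⟩ := h
  obtain ⟨a1, a2, a3⟩ := a; obtain ⟨b1, b2, b3⟩ := b
  simp_all

theorem pv_foldl_prefix (val : (String × String × String) → Int)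
    (l : List (String × String × String)) (acc : List ((String × String) × Int))
    (g : (String × String) × Int) :
    l.foldl (fun parts k =>
      match parts.getLast? with
      | some last =>
        if last.1 = pvPair k then parts.dropLast ++ [(last.1, last.2 + val k)]
        else parts ++ [(pvPair k, val k)]
      | none => [(pvPair k, val k)]) (acc ++ [g]) =
    acc ++ l.foldl (fun parts k =>
      match parts.getLast? with
      | some last =>
        if last.1 = pvPair k then parts.dropLast ++ [(last.1, last.2 + val k)]
        else parts ++ [(pvPair k, val k)]
      | none => [(pvPair k, val k)]) [g] := by
  induction l generalizing acc g with
  | nil => simp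
  | cons k t ih =>
    simp only [List.foldl_cons, List.getLast?_concat, List.dropLast_concat]
    have h1 : ([g].getLast?) = some g := rfl
    have h2 : ([g].dropLast) = [] := rfl
    rw [h1, h2]
    by_cases h : g.1 = pvPair k
    · simp only [h, if_true, List.nil_append]
      exact ih acc (pvPair k, g.2 + val k)
    · simp only [if_neg h, List.nil_append]
      rw [ih (acc ++ [g]) (pvPair k, val k), ih [g] (pvPair k, val k)]
      simp

theorem pv_foldl_open (val : (String × String × String) → Int)
    (t : List (String × String × String)) :
    ∀ (p0 : String × String) (a : Int),
    t.foldl (fun parts k =>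
      match parts.getLast? with
      | some last =>
        if last.1 = pvPair k then parts.dropLast ++ [(last.1, last.2 + val k)]
        else parts ++ [(pvPair k, val k)]
      | none => [(pvPair k, val k)]) [(p0, a)] =
    (p0, a + ((t.takeWhile (fun x => pvPair x = p0)).map val).sum) ::
      pvGrp val (t.dropWhile (fun x => pvPair x = p0)) := by
  induction t with
  | nil => intro p0 a; simp [pvGrp]
  | cons k' t2 ih =>
    intro p0 a
    simp only [List.foldl_cons]
    have h1 : ([(p0, a)].getLast?) = some (p0, a) := rfl
    have h2 : ([(p0, a)].dropLast) = ([] : List ((String × String) × Int)) := rfl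
    rw [h1, h2]
    by_cases h : pvPair k' = p0
    · simp only [h, List.nil_append, List.takeWhile_cons, List.dropWhile_cons,
        decide_true, if_pos]
      rw [ih p0 (a + val k')]
      simp [add_assoc]
    · have hne : ¬ ((p0, a).1 = pvPair k') := fun hh => h hh.symm
      simp only [if_neg hne]
      rw [pv_foldl_prefix, ih (pvPair k') (val k')]
      rw [List.takeWhile_cons, List.dropWhile_cons]
      simp [h, pvGrp]

theorem pv_foldl_eq_grp (val : (String × String × String) → Int)
    (l : List (String × String × String)) :
    l.foldl (fun parts k =>
      match parts.getLast? with
      | some last =>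
        if last.1 = pvPair k then parts.dropLast ++ [(last.1, last.2 + val k)]
        else parts ++ [(pvPair k, val k)]
      | none => [(pvPair k, val k)]) [] = pvGrp val l := by
  cases l with
  | nil => simp [pvGrp]
  | cons k t =>
    simp only [List.foldl_cons]
    rw [show (List.getLast? ([] : List ((String × String) × Int))) = none from rfl]
    rw [pv_foldl_open val t (pvPair k) (val k)]
    simp [pvGrp]

theorem pv_grp_mem (val : (String × String × String) → Int)
    (l : List (String × String × String)) (p : String × String) :
    p ∈ (pvGrp val l).map Prod.fst ↔ p ∈ l.map pvPair := by
  induction l using pvGrp.induct with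
  | case1 => simp [pvGrp]
  | case2 k t ih =>
    simp only [pvGrp, List.map_cons, List.mem_cons]
    rw [ih]
    constructor
    · rintro (rfl | hp)
      · exact Or.inl rfl
      · right
        have hsub : (t.dropWhile (fun x => pvPair x = pvPair k)).Sublist t :=
          List.dropWhile_sublist _
        rcases List.mem_map.mp hp with ⟨x, hx, rfl⟩
        exact List.mem_map_of_mem (hsub.subset hx)
    · rintro (rfl | hp)
      · exact Or.inl rfl
      · rcases List.mem_map.mp hp with ⟨x, hx, rfl⟩
        by_cases hx' : pvPair x = pvPair k
        · exact Or.inl hx'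
        · right
          refine List.mem_map_of_mem ?_
          rcases (List.takeWhile_append_dropWhile (p := fun x => decide (pvPair x = pvPair k)) (l := t)) ▸ hx with h
          rcases List.mem_append.mp h with h | h
          · exact absurd (of_decide_eq_true
              (List.mem_takeWhile_imp (p := fun x => decide (pvPair x = pvPair k)) h)) hx'
          · exact h

theorem pv_dropWhile_gt (k : String × String × String)
    (t : List (String × String × String))
    (hc : (k :: t).Pairwise (fun x y => pvKeyP (pvPair x) ≤ pvKeyP (pvPair y))) :
    ∀ y ∈ t.dropWhile (fun x => pvPair x = pvPair k),
      pvKeyP (pvPair k) < pvKeyP (pvPair y) := by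
  induction t with
  | nil => simp
  | cons x t2 ih =>
    rw [List.dropWhile_cons]
    by_cases hx : pvPair x = pvPair k
    · simp only [hx, decide_true, if_true]
      refine ih ?_
      have := hc.sublist (List.cons_sublist_cons.mpr (List.sublist_cons_self x t2))
      exact this
    · simp only [hx, decide_false]
      intro y hy
      have hkx : pvKeyP (pvPair k) < pvKeyP (pvPair x) := by
        have hle : pvKeyP (pvPair k) ≤ pvKeyP (pvPair x) :=
          (List.pairwise_cons.mp hc).1 x (List.mem_cons_self)
        refine lt_of_le_of_ne hle (fun he => hx ?_)
        exact (toLex_inj.mp he).symm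
      rcases List.mem_cons.mp hy with rfl | hy2
      · exact hkx
      · have hxy : pvKeyP (pvPair x) ≤ pvKeyP (pvPair y) := by
          have ht : (x :: t2).Pairwise (fun a b => pvKeyP (pvPair a) ≤ pvKeyP (pvPair b)) :=
            (List.pairwise_cons.mp hc).2
          exact (List.pairwise_cons.mp ht).1 y hy2
        exact lt_of_lt_of_le hkx hxy

theorem pv_grp_pairwise (val : (String × String × String) → Int)
    (l : List (String × String × String))
    (hc : l.Pairwise (fun x y => pvKeyP (pvPair x) ≤ pvKeyP (pvPair y))) :
    ((pvGrp val l).map Prod.fst).Pairwise (fun x y => pvKeyP x < pvKeyP y) := by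
  induction l using pvGrp.induct with
  | case1 => simp [pvGrp]
  | case2 k t ih =>
    simp only [pvGrp, List.map_cons]
    rw [List.pairwise_cons]
    have hdw : (t.dropWhile (fun x => pvPair x = pvPair k)).Pairwise
        (fun x y => pvKeyP (pvPair x) ≤ pvKeyP (pvPair y)) :=
      ((List.pairwise_cons.mp hc).2).sublist (List.dropWhile_sublist _)
    refine ⟨?_, ih hdw⟩
    intro p hp
    rcases List.mem_map.mp ((pv_grp_mem val _ p).mp hp) with ⟨x, hx, rfl⟩
    exact pv_dropWhile_gt k t hc x hx

theorem pv_grp_snd (val : (String × String × String) → Int)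
    (l : List (String × String × String))
    (hc : l.Pairwise (fun x y => pvKeyP (pvPair x) ≤ pvKeyP (pvPair y))) :
    ∀ q ∈ pvGrp val l, q.2 = pvSum val l q.1 := by
  induction l using pvGrp.induct with
  | case1 => simp [pvGrp]
  | case2 k t ih =>
    intro q hq
    rw [pvGrp] at hq
    have hsplit := List.takeWhile_append_dropWhile
      (p := fun x => decide (pvPair x = pvPair k)) (l := t)
    have htail : (t.dropWhile (fun x => pvPair x = pvPair k)).Pairwise
        (fun x y => pvKeyP (pvPair x) ≤ pvKeyP (pvPair y)) :=
      ((List.pairwise_cons.mp hc).2).sublist (List.dropWhile_sublist _)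
    rcases List.mem_cons.mp hq with rfl | hq2
    · -- head group
      simp only [pvSum, List.filter_cons, decide_true, if_true, List.map_cons, List.sum_cons]
      congr 1
      -- filter t = takeWhile t under the chain
      have : t.filter (fun x => decide (pvPair x = pvPair k)) =
          t.takeWhile (fun x => decide (pvPair x = pvPair k)) := by
        conv_lhs => rw [← hsplit]
        rw [List.filter_append]
        have h1 : (t.takeWhile (fun x => decide (pvPair x = pvPair k))).filter
            (fun x => decide (pvPair x = pvPair k)) =
            t.takeWhile (fun x => decide (pvPair x = pvPair k)) := by
          apply List.filter_eq_self.mpr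
          intro a ha
          exact List.mem_takeWhile_imp (p := fun x => decide (pvPair x = pvPair k)) ha
        have h2 : (t.dropWhile (fun x => pvPair x = pvPair k)).filter
            (fun x => decide (pvPair x = pvPair k)) = [] := by
          apply List.filter_eq_nil_iff.mpr
          intro a ha
          have := pv_dropWhile_gt k t hc a ha
          simp only [decide_eq_true_eq]
          intro he
          exact absurd (congrArg pvKeyP he) (ne_of_gt this)
        rw [h1, h2, List.append_nil]
      rw [this]
    · -- a later group
      have hq1 : q.1 ∈ (t.dropWhile (fun x => pvPair x = pvPair k)).map pvPair :=
        (pv_grp_mem val _ q.1).mp (List.mem_map_of_mem hq2)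
      have hgt : pvKeyP (pvPair k) < pvKeyP q.1 := by
        rcases List.mem_map.mp hq1 with ⟨x, hx, hpx⟩
        rw [← hpx]
        exact pv_dropWhile_gt k t hc x hx
      rw [ih htail q hq2]
      -- pvSum over dropWhile = pvSum over k :: t, since nothing before matches q.1
      simp only [pvSum]
      congr 1
      conv_rhs => rw [show (k :: t) = [k] ++ t from rfl, ← hsplit]
      rw [List.filter_append, List.filter_append]
      have hknot : ([k].filter (fun x => decide (pvPair x = q.1))) = [] := by
        simp only [List.filter_cons, List.filter_nil]
        have : pvPair k ≠ q.1 := fun he => absurd (congrArg pvKeyP he) (ne_of_lt hgt)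
        simp [this]
      have htw : ((t.takeWhile (fun x => pvPair x = pvPair k)).filter
          (fun x => decide (pvPair x = q.1))) = [] := by
        apply List.filter_eq_nil_iff.mpr
        intro a ha
        have hak : pvPair a = pvPair k :=
          of_decide_eq_true (List.mem_takeWhile_imp (p := fun x => decide (pvPair x = pvPair k)) ha)
        simp only [decide_eq_true_eq]
        intro he
        rw [hak] at he
        exact absurd (congrArg pvKeyP he) (ne_of_lt hgt)
      rw [hknot, htw]
      simp

theorem pv_sc_getD (val : (String × String × String) → Int)
    (l : List (String × String × String)) (dacc : PySem.Dict (String × String) Int)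
    (p : String × String) :
    (l.foldl (fun sc k => sc.modify (pvPair k) 0 (· + val k)) dacc).getD p 0 =
      dacc.getD p 0 + pvSum val l p := by
  induction l generalizing dacc with
  | nil => simp [pvSum]
  | cons k t ih =>
    simp only [List.foldl_cons]
    rw [ih]
    rw [PySem.Dict.getD_modify]
    simp only [pvSum, List.filter_cons]
    by_cases h : pvPair k = p
    · simp only [h, decide_true, if_true, List.map_cons, List.sum_cons]
      ring
    · have h' : ¬ (p = pvPair k) := fun he => h he.symm
      simp [if_neg h', h]

theorem pv_main (d : PySem.Dict (String × String × String) Int) (hK : d.keys.Nodup) :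
    PySem.Str.join ", " ((PySem.List.sorted
        (d.keys.foldl (fun sc k => sc.modify (pvPair k) 0 (· + d.getD k 0)) PySem.Dict.empty : PySem.Dict (String × String) Int).keys
        pvKeyP false).map (fun item =>
          "(" ++ item.1 ++ ":" ++ item.2 ++ ")x" ++ PySem.Int.toStr
            ((d.keys.foldl (fun sc k => sc.modify (pvPair k) 0 (· + d.getD k 0))
              PySem.Dict.empty).getD item 0)))
      ++ "\nresponses:\n"
      ++ PySem.Str.join "\n" ((PySem.List.sorted d.keys pvKey3 true).map (fun item => item.2.2))
    = PySem.Str.join ", " (((PySem.List.sorted d.keys pvKey3 false).foldl (fun parts k =>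
        match parts.getLast? with
        | some last =>
          if last.1 = pvPair k then parts.dropLast ++ [(last.1, last.2 + d.getD k 0)]
          else parts ++ [(pvPair k, d.getD k 0)]
        | none => [(pvPair k, d.getD k 0)]) []).map (fun p =>
          "(" ++ p.1.1 ++ ":" ++ p.1.2 ++ ")x" ++ PySem.Int.toStr p.2))
      ++ "\nresponses:\n"
      ++ PySem.Str.join "\n" ((PySem.List.sorted d.keys pvKey3 false).reverse.map (fun item => item.2.2)) := by
  have hSp : (PySem.List.sorted d.keys pvKey3 false).Perm d.keys :=
    PySem.List.sorted_perm d.keys pvKey3 false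
  set S := PySem.List.sorted d.keys pvKey3 false with hS
  set val : (String × String × String) → Int := fun k => d.getD k 0 with hval
  set sc := d.keys.foldl (fun sc k => sc.modify (pvPair k) 0 (· + val k)) PySem.Dict.empty with hsc
  have hSnd : S.Nodup := hSp.nodup_iff.mpr hK
  have hle : S.Pairwise (fun a b => pvKey3 a ≤ pvKey3 b) := PySem.List.sorted_pairwise d.keys pvKey3
  have hlt : S.Pairwise (fun a b => pvKey3 a < pvKey3 b) := by
    refine (hle.and hSnd).imp ?_
    rintro a b ⟨h1, h2⟩
    exact lt_of_le_of_ne h1 (fun he => h2 (pv_key3_inj he))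
  have hchainP : S.Pairwise (fun x y => pvKeyP (pvPair x) ≤ pvKeyP (pvPair y)) :=
    hle.imp (fun {a b} h => pv_lex_pair_mono a b h)
  -- long part
  have hlong : PySem.List.sorted d.keys pvKey3 true = S.reverse :=
    PySem.List.sorted_rev_eq_of_perm_of_pairwise_gt d.keys S.reverse pvKey3
      (S.reverse_perm.trans hSp) (List.pairwise_reverse.mpr hlt)
  -- short part
  have hparts : S.foldl (fun parts k =>
      match parts.getLast? with
      | some last =>
        if last.1 = pvPair k then parts.dropLast ++ [(last.1, last.2 + val k)]
        else parts ++ [(pvPair k, val k)]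
      | none => [(pvPair k, val k)]) [] = pvGrp val S := pv_foldl_eq_grp val S
  have hsckeys : sc.keys = PySem.Set.ofList (d.keys.map pvPair) := by
    rw [hsc, PySem.Dict.keys_foldl_modify_key d.keys pvPair 0 (fun _ k => (· + val k))
      PySem.Dict.empty, PySem.Dict.keys_empty, PySem.Set.update_nil_left]
  have hP := pv_grp_pairwise val S hchainP
  have hPnd : ((pvGrp val S).map Prod.fst).Nodup := by
    refine hP.imp ?_
    intro a b h he
    exact absurd (he ▸ h) (lt_irrefl _)
  have hperm : ((pvGrp val S).map Prod.fst).Perm sc.keys := by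
    rw [List.perm_ext_iff_of_nodup hPnd (by rw [hsckeys]; exact PySem.Set.nodup_ofList _)]
    intro p
    rw [pv_grp_mem val S p, hsckeys, PySem.Set.mem_ofList]
    exact (hSp.map pvPair).mem_iff
  have hshortlist : PySem.List.sorted sc.keys pvKeyP false = (pvGrp val S).map Prod.fst :=
    PySem.List.sorted_eq_of_perm_of_pairwise_lt sc.keys ((pvGrp val S).map Prod.fst) pvKeyP hperm hP
  have hsum : ∀ p, sc.getD p 0 = pvSum val S p := by
    intro p
    rw [hsc, pv_sc_getD val d.keys PySem.Dict.empty p, PySem.Dict.getD_empty, zero_add]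
    simp only [pvSum]
    exact (((hSp.filter _).map val).sum_eq).symm
  rw [hlong, hparts, hshortlist, List.map_map]
  have hmap : (pvGrp val S).map ((fun item =>
      "(" ++ item.1 ++ ":" ++ item.2 ++ ")x" ++ PySem.Int.toStr (sc.getD item 0)) ∘ Prod.fst) =
      (pvGrp val S).map (fun p => "(" ++ p.1.1 ++ ":" ++ p.1.2 ++ ")x" ++ PySem.Int.toStr p.2) := by
    apply List.map_congr_left
    intro q hq
    simp only [Function.comp]
    have : sc.getD q.1 0 = q.2 := by
      rw [hsum q.1, ← pv_grp_snd val S hchainP q hq]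
    rw [this]
  rw [hmap]

theorem sorted_repr_eq (counter : List (String × String × String × Int)) :
    sorted_repr counter = sorted_repr_alt counter := by
  have hd := PySem.Dict.nodup_keys_ofList
    (List.map (fun p => ((p.1, p.2.1, p.2.2.1), p.2.2.2)) counter)
  have hm := pv_main (PySem.Dict.ofList
    (List.map (fun p => ((p.1, p.2.1, p.2.2.1), p.2.2.2)) counter)) hd
  simp only [sorted_repr, sorted_repr_alt]
  exact hm

-- ===== VERDICT (by name: the statement is the Claim_ definition above) =====
theorem sorted_repr_spec : Claim_equal_sorted_repr := by
  intro counter _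
  unfold Spec_sorted_repr
  exact sorted_repr_eq counter
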